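-- pv_equiv track=rewrite | github.com/sijintech/stk | toolkits/sjob/htpstudio.py | incrementChoiceProcess
-- ===== SOURCE A (Python) =====
-- def incrementChoiceProcess(processStr):
--     # 先根据 "#" 分割输入字符串为多个记录
--     records = processStr.split('#')
--
--     result = []
--
--     # 对每个记录进行处理
--     for record in records:
--         # 根据 "~" 分割每条记录，获得字段数
--         fields = record.split('~')
--
--         # 如果字段数 >= 2，则记录的行号会多次输出，输出字段数次行号
--         if len(fields) >= 2:
--             result.extend([len(result) + 1] * len(fields))  # 这里 len(result) + 1 就是行号
--         else:
--             result.append(len(result) + 1)  # 只有一个字段时，输出一次行号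
--
--     return result
-- ===== SOURCE B (Python) =====
-- def incrementChoiceProcess(processStr):
--     # Character-level state machine: one pass over the raw characters with no
--     # split() calls; '#' flushes the current record, '~' bumps its field count.
--     result = []
--     lineno = 1
--     fields = 1
--     for ch in processStr:
--         if ch == '#':
--             result.extend([lineno] * fields)
--             lineno += fields
--             fields = 1
--         elif ch == '~':
--             fields += 1
--     result.extend([lineno] * fields)
--     return result
-- ===== Notes on version B (the rewrite author's own statement) =====
-- stated objective: alternative
-- what changed: Replaces A's split('#')/split('~') record-and-field decomposition with a single character-level state machine that never splits: it scans the raw characters once, counting '~' to size the current record and flushing it on '#' with explicit lineno/fields counters instead of len(result).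
import Mathlib
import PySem

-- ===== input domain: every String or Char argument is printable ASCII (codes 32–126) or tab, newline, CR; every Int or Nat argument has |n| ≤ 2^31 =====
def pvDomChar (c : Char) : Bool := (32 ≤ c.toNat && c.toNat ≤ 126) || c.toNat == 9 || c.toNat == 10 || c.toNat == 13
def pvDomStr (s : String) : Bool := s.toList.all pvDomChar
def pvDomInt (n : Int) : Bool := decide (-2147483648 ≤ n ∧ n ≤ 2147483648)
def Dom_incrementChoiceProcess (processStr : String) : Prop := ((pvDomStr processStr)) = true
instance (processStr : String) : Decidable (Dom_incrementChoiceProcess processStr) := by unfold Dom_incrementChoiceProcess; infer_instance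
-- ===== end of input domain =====

-- B replaces A's split-based record/field decomposition by a single character-level
-- state machine (no splits, explicit lineno/fields counters): alternative algorithm, same cost.


-- ===== PORT A =====
def incrementChoiceProcess (processStr : String) : List Int :=
  let records := PySem.Chars.splitOn processStr.toList ['#']
  records.foldl (fun result record =>
    let fields := PySem.Chars.splitOn record ['~']
    if 2 ≤ fields.length then
      result ++ List.replicate fields.length ((result.length : Int) + 1)
    else
      result ++ [((result.length : Int) + 1)]) []

-- ===== PORT B =====
-- one pass over the characters; state = (result, lineno, fields)
def incrementChoiceProcess_alt (processStr : String) : List Int :=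
  let st := processStr.toList.foldl
    (fun (st : List Int × Int × Nat) ch =>
      if ch = '#' then (st.1 ++ List.replicate st.2.2 st.2.1, st.2.1 + (st.2.2 : Int), 1)
      else if ch = '~' then (st.1, st.2.1, st.2.2 + 1)
      else st) ([], 1, 1)
  st.1 ++ List.replicate st.2.2 st.2.1

-- ===== PRECONDITION & SPEC =====
def Spec_incrementChoiceProcess (processStr : String) (out : List Int) : Prop := out = incrementChoiceProcess_alt processStr
instance (processStr : String) (out : List Int) : Decidable (Spec_incrementChoiceProcess processStr out) := by unfold Spec_incrementChoiceProcess; infer_instance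

-- ===== CLAIM (what is proved, stated in full; the proofs are below) =====
def Claim_equal_incrementChoiceProcess : Prop := ∀ (processStr : String), Dom_incrementChoiceProcess processStr → Spec_incrementChoiceProcess processStr (incrementChoiceProcess processStr)

-- ===== LEMMAS AND PROOFS =====

-- splitOn never returns the empty list
theorem pv_splitOn_go_ne_nil (sep : List Char) (fuel : Nat) (l cur : List Char)
    (acc : List (List Char)) : PySem.Chars.splitOn.go sep fuel l cur acc ≠ [] := by
  induction fuel generalizing l cur acc with
  | zero => simp [PySem.Chars.splitOn.go]
  | succ n ih =>
    cases l with
    | nil => simp [PySem.Chars.splitOn.go]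
    | cons c rest =>
      rw [PySem.Chars.splitOn.go]
      split
      · exact ih _ _ _
      · exact ih _ _ _

theorem pv_splitOn_ne_nil (s sep : List Char) : PySem.Chars.splitOn s sep ≠ [] :=
  pv_splitOn_go_ne_nil sep _ s [] []

-- common spec: expand a list of field counts, starting after n already-emitted lines
def pvExpand : List Nat → Nat → List Int
  | [], _ => []
  | c :: cs, n => List.replicate c ((n : Int) + 1) ++ pvExpand cs (n + c)

-- field counts read directly off the characters (f = fields in the open record)
def pvCounts : List Char → Nat → List Nat
  | [], f => [f]
  | c :: cs, f =>
    if c = '#' then f :: pvCounts cs 1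
    else if c = '~' then pvCounts cs (f + 1)
    else pvCounts cs f

-- A's loop expands the per-record field counts
theorem pv_A_loop (records : List (List Char)) (acc : List Int) :
    records.foldl (fun result record =>
      let fields := PySem.Chars.splitOn record ['~']
      if 2 ≤ fields.length then
        result ++ List.replicate fields.length ((result.length : Int) + 1)
      else
        result ++ [((result.length : Int) + 1)]) acc
    = acc ++ pvExpand (records.map (fun r => (PySem.Chars.splitOn r ['~']).length)) acc.length := by
  induction records generalizing acc with
  | nil => simp [pvExpand]
  | cons r rs ih =>
    have hne := pv_splitOn_ne_nil r ['~']
    simp only [List.foldl, List.map, pvExpand]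
    split
    · rw [ih]
      simp
    · rename_i h
      have h1 : (PySem.Chars.splitOn r ['~']).length = 1 := by
        have := List.length_pos_of_ne_nil hne
        omega
      rw [ih]
      simp [h1]

-- splitting on a single char yields 1 + (count of that char) pieces
theorem pv_splitOn_go_len (t : Char) (fuel : Nat) (l cur : List Char)
    (acc : List (List Char)) (h : l.length < fuel) :
    (PySem.Chars.splitOn.go [t] fuel l cur acc).length = acc.length + 1 + l.count t := by
  induction fuel generalizing l cur acc with
  | zero => omega
  | succ n ih =>
    cases l with
    | nil => simp [PySem.Chars.splitOn.go]
    | cons c rest =>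
      rw [PySem.Chars.splitOn.go]
      simp only [List.isPrefixOf, Bool.and_true]
      split
      · rename_i hc
        have hc' : t = c := by simpa using hc
        rw [ih _ _ _ (by simp at h ⊢; omega)]
        subst hc'
        simp
        omega
      · rename_i hc
        have hc' : ¬ t = c := by simpa using hc
        have hc2 : ¬ c = t := fun hh => hc' hh.symm
        rw [ih _ _ _ (by simp at h ⊢; omega)]
        simp [hc2]

theorem pv_splitOn_len (t : Char) (l : List Char) :
    (PySem.Chars.splitOn l [t]).length = 1 + l.count t := by
  unfold PySem.Chars.splitOn
  rw [pv_splitOn_go_len t _ l [] [] (by omega)]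
  simp

-- per-record field counts of splitOn '#' = pvCounts, read off the characters
theorem pv_counts_go (fuel : Nat) (l cur : List Char) (acc : List (List Char))
    (h : l.length < fuel) :
    (PySem.Chars.splitOn.go ['#'] fuel l cur acc).map (fun r => 1 + r.count '~')
      = acc.reverse.map (fun r => 1 + r.count '~') ++ pvCounts l (1 + cur.count '~') := by
  induction fuel generalizing l cur acc with
  | zero => omega
  | succ n ih =>
    cases l with
    | nil => simp [PySem.Chars.splitOn.go, pvCounts]
    | cons c rest =>
      rw [PySem.Chars.splitOn.go]
      simp only [List.isPrefixOf, Bool.and_true]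
      split
      · rename_i hc
        have hc' : c = '#' := by have := of_decide_eq_true hc; exact this.symm
        rw [ih _ _ _ (by simp at h ⊢; omega)]
        simp [hc', pvCounts]
      · rename_i hc
        have hc' : ¬ c = '#' := fun hh => (by simpa using hc : ¬ '#' = c) hh.symm
        rw [ih _ _ _ (by simp at h ⊢; omega)]
        by_cases ht : c = '~' <;> simp [pvCounts, hc', ht, Nat.add_comm]

theorem pv_counts (s : List Char) :
    (PySem.Chars.splitOn s ['#']).map (fun r => 1 + r.count '~') = pvCounts s 1 := by
  unfold PySem.Chars.splitOn
  rw [pv_counts_go _ s [] [] (by omega)]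
  simp

-- B's scan expands pvCounts
theorem pv_B_loop (s : List Char) (res : List Int) (n f : Nat) :
    (let st := s.foldl
      (fun (st : List Int × Int × Nat) ch =>
        if ch = '#' then (st.1 ++ List.replicate st.2.2 st.2.1, st.2.1 + (st.2.2 : Int), 1)
        else if ch = '~' then (st.1, st.2.1, st.2.2 + 1)
        else st) (res, (n : Int) + 1, f)
     st.1 ++ List.replicate st.2.2 st.2.1)
    = res ++ pvExpand (pvCounts s f) n := by
  induction s generalizing res n f with
  | nil => simp [pvCounts, pvExpand]
  | cons c cs ih =>
    by_cases hc : c = '#'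
    · subst hc
      have hcast : ((n : Int) + 1) + (f : Int) = ((n + f : Nat) : Int) + 1 := by push_cast; ring
      simp only [List.foldl, reduceIte]
      rw [hcast, ih]
      simp [pvCounts, pvExpand]
    · by_cases ht : c = '~'
      · subst ht
        simp only [List.foldl, reduceIte]
        rw [if_neg hc, ih]
        simp [pvCounts]
      · simp only [List.foldl, if_neg hc, if_neg ht]
        rw [ih]
        simp [pvCounts, hc, ht]

-- ===== VERDICT (by name: the statement is the Claim_ definition above) =====
theorem incrementChoiceProcess_spec : Claim_equal_incrementChoiceProcess := by
  intro s _
  unfold Spec_incrementChoiceProcess incrementChoiceProcess incrementChoiceProcess_alt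
  rw [pv_A_loop]
  have hmap : (PySem.Chars.splitOn s.toList ['#']).map
      (fun r => (PySem.Chars.splitOn r ['~']).length) = pvCounts s.toList 1 := by
    rw [← pv_counts s.toList]
    exact List.map_congr_left (fun r _ => pv_splitOn_len '~' r)
  simp only [List.length_nil, List.nil_append, hmap]
  have := pv_B_loop s.toList [] 0 1
  simpa using this.symm
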